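-- pv_equiv track=rewrite | github.com/MykhailoKopytskyi/Connect-4-AI-Agent | connect4Agent.py | get_encoded_symmetrical_board
-- ===== SOURCE A (Python) =====
-- def get_encoded_symmetrical_board(encoded_game_board: tuple[int,int], numRows, numColumns) -> tuple[int,int]:
-- 	xs = encoded_game_board[0]
-- 	os = encoded_game_board[1]
--
-- 	symmetrical_xs = 0b0
-- 	symmetrical_os = 0b0
--
-- 	for i in range(numRows):
-- 		mask = (2**(numColumns)-1) << ((numRows-1-i) * numColumns) # The mask to extract a row (numRows-i). i.e. we start extraction from the end (i.e. we preserve representation defined in encode_game_board() function)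
--
-- 		xs_row = (xs & mask) >> ((numRows-1-i) * numColumns) # We extract a row of X's and move it right (so that the first numColumns bits in this number represent an extracted row)
-- 		symmetrical_xs_row = reverse_bits(xs_row, numColumns) # We reverse the row of X's
-- 		symmetrical_xs = symmetrical_xs << (numColumns) # Move the number left so that we can add this new symmetrical row to it
-- 		symmetrical_xs = symmetrical_xs | symmetrical_xs_row # Add the symmetrical row to the number
--
-- 		os_row = (os & mask) >> ((numRows-1-i) * numColumns) # We extract a row of O's and move it right (so that the first numColumns bits in this number represent an extracted row)
-- 		symmetrical_os_row = reverse_bits(os_row, numColumns) # We reverse the row of O's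
-- 		symmetrical_os = symmetrical_os << (numColumns) # Move the number left so that we can add this new symmetrical row to it
-- 		symmetrical_os = symmetrical_os | symmetrical_os_row # Add the symmetrical row to the number
-- 	return (symmetrical_xs, symmetrical_os)
--
-- def reverse_bits(num, num_width):
-- 	reversed_num=0
-- 	for i in range(num_width):
-- 		reversed_num = (reversed_num << 1) | (num & 1)
-- 		num = num >> 1
-- 	return reversed_num
-- ===== SOURCE B (Python) =====
-- def get_encoded_symmetrical_board(encoded_game_board: tuple[int,int], numRows, numColumns) -> tuple[int,int]:
-- 	xs = encoded_game_board[0]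
-- 	os = encoded_game_board[1]
-- 	if numRows <= 0 or numColumns <= 0:
-- 		return (0, 0)
-- 	n = numRows * numColumns
--
-- 	def mirror(v):
-- 		# Build the mirrored plane bit by bit, from the most significant
-- 		# position down: output position q takes the bit of v found at the
-- 		# horizontally mirrored position within the same row.
-- 		out = 0
-- 		for q in range(n - 1, -1, -1):
-- 			r, c = divmod(q, numColumns)
-- 			out = (out << 1) | ((v >> (r * numColumns + (numColumns - 1 - c))) & 1)
-- 		return out
--
-- 	return (mirror(xs), mirror(os))
-- ===== Notes on version B (the rewrite author's own statement) =====
-- stated objective: alternative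
-- what changed: B replaces A's nested row-extraction (per-row mask, shift, bit-reversal helper, row reassembly) with a single flat loop over all numRows*numColumns bit positions that builds each mirrored plane bit by bit, computing the horizontally mirrored source index of each position via divmod; degenerate dimensions return (0,0) directly.
import Mathlib
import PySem

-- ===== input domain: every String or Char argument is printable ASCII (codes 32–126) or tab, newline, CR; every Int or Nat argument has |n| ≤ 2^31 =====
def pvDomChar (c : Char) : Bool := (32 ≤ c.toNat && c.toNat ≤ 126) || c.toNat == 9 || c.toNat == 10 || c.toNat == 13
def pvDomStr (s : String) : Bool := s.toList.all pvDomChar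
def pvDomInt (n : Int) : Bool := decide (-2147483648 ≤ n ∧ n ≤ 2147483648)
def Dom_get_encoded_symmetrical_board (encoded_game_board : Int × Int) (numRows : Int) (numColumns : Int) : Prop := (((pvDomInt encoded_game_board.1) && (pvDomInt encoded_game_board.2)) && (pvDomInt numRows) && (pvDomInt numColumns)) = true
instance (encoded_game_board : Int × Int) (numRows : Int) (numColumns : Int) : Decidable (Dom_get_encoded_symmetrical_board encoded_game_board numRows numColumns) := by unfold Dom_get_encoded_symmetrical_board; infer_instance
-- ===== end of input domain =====

-- B rebuilds each plane in ONE flat pass over all bit positions (mirroring each index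
-- in place via divmod) instead of A's nested row-extraction with a bit-reversal helper;
-- objective: alternative (same exact results, different algorithmic decomposition).

-- ===== PORT A =====
def reverse_bits (num : Int) (num_width : Int) : Int :=
  ((PySem.List.pyRange 0 num_width 1).foldl
    (fun (st : Int × Int) _ =>
      (PySem.Int.bor (st.1 <<< (1:Nat)) (PySem.Int.band st.2 1), st.2 >>> (1:Nat)))
    (0, num)).1

def get_encoded_symmetrical_board (encoded_game_board : Int × Int) (numRows : Int) (numColumns : Int) : Int × Int :=
  let xs := encoded_game_board.1
  let os := encoded_game_board.2
  (PySem.List.pyRange 0 numRows 1).foldl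
    (fun (st : Int × Int) i =>
      (PySem.Int.bor (st.1 <<< numColumns.toNat)
        (reverse_bits
          ((PySem.Int.band xs (((2:Int) ^ numColumns.toNat - 1) <<< ((numRows - 1 - i) * numColumns).toNat)) >>>
            ((numRows - 1 - i) * numColumns).toNat)
          numColumns),
       PySem.Int.bor (st.2 <<< numColumns.toNat)
        (reverse_bits
          ((PySem.Int.band os (((2:Int) ^ numColumns.toNat - 1) <<< ((numRows - 1 - i) * numColumns).toNat)) >>>
            ((numRows - 1 - i) * numColumns).toNat)
          numColumns)))
    (0, 0)

-- ===== PORT B =====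
def pvMirror (v : Int) (numRows : Int) (numColumns : Int) : Int :=
  (PySem.List.pyRange (numRows * numColumns - 1) (-1) (-1)).foldl
    (fun out q =>
      let r := PySem.Int.floordiv q numColumns
      let c := PySem.Int.mod q numColumns
      PySem.Int.bor (out <<< (1:Nat))
        (PySem.Int.band (v >>> (r * numColumns + (numColumns - 1 - c)).toNat) 1))
    0

def get_encoded_symmetrical_board_alt (encoded_game_board : Int × Int) (numRows : Int) (numColumns : Int) : Int × Int :=
  if numRows ≤ 0 ∨ numColumns ≤ 0 then (0, 0)
  else (pvMirror encoded_game_board.1 numRows numColumns,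
        pvMirror encoded_game_board.2 numRows numColumns)

-- ===== PRECONDITION & SPEC =====
-- Pre_ excludes exactly the inputs where A raises (numRows > 0 with a negative numColumns:
-- 2**numColumns is a float there and `<<` on it raises TypeError); A returns on everything else.
def Pre_get_encoded_symmetrical_board (encoded_game_board : Int × Int) (numRows : Int) (numColumns : Int) : Prop :=
  numRows ≤ 0 ∨ 0 ≤ numColumns
instance (encoded_game_board : Int × Int) (numRows : Int) (numColumns : Int) : Decidable (Pre_get_encoded_symmetrical_board encoded_game_board numRows numColumns) := by unfold Pre_get_encoded_symmetrical_board; infer_instance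
def pvWitness_get_encoded_symmetrical_board : (Int × Int) × Int × Int := ((38, 25), 3, 2)

def Spec_get_encoded_symmetrical_board (encoded_game_board : Int × Int) (numRows : Int) (numColumns : Int) (out : Int × Int) : Prop := out = get_encoded_symmetrical_board_alt encoded_game_board numRows numColumns
instance (encoded_game_board : Int × Int) (numRows : Int) (numColumns : Int) (out : Int × Int) : Decidable (Spec_get_encoded_symmetrical_board encoded_game_board numRows numColumns out) := by unfold Spec_get_encoded_symmetrical_board; infer_instance

-- ===== CLAIM (what is proved, stated in full; the proofs are below) =====
def Claim_equal_get_encoded_symmetrical_board : Prop := ∀ (encoded_game_board : Int × Int) (numRows : Int) (numColumns : Int), Dom_get_encoded_symmetrical_board encoded_game_board numRows numColumns → Pre_get_encoded_symmetrical_board encoded_game_board numRows numColumns → Spec_get_encoded_symmetrical_board encoded_game_board numRows numColumns (get_encoded_symmetrical_board encoded_game_board numRows numColumns)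

-- ===== LEMMAS AND PROOFS =====

-- bit j of v, as Python computes it: (v >> j) % 2 (two's complement on negatives)
def pvBit (v : Int) (k : Nat) : Int := PySem.Int.mod (v >>> k) 2

-- append the lowest C bits of v (LSB first) to accumulator a
def pvRow : Int → Int → Nat → Int
  | a, _, 0 => a
  | a, v, (C+1) => pvRow (a * 2 + PySem.Int.mod v 2) (v >>> (1:Nat)) C

-- the common spec: mirror R rows of C columns of v, top row first
def pvSpec (C : Nat) : Nat → Int → Int
  | 0, _ => 0
  | (R+1), v => pvRow (pvSpec C R (v >>> C)) v C

-- mirrored source position within the same row (Nat form of B's divmod arithmetic)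
def pvSrc (C q : Nat) : Nat := (q / C) * C + (C - 1 - q % C)

theorem pvCastShiftL (m k : Nat) : ((m:Int) <<< k) = ((m <<< k : Nat) : Int) := Int.mem_toNat?.mp rfl
theorem pvCastShiftR (m k : Nat) : ((m:Int) >>> k) = ((m >>> k : Nat) : Int) := Int.mem_toNat?.mp rfl
theorem pvShiftRR (v : Int) (a b : Nat) : (v >>> a) >>> b = v >>> (a + b) := (Int.shiftRight_add v a b).symm

theorem pvN1 (m n k : Nat) (h : n < 2^k) : (m <<< k) ||| n = m * 2^k + n := by
  apply Nat.eq_of_testBit_eq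
  intro j
  rw [Nat.shiftLeft_eq, Nat.testBit_lor, ← Nat.mul_comm (2^k) m,
      Nat.testBit_two_pow_mul_add m h j, Nat.testBit_two_pow_mul]
  rcases lt_or_ge j k with hj | hj
  · simp [hj, Nat.not_le.mpr hj]
  · simp [hj, Nat.not_lt.mpr hj,
      Nat.testBit_eq_false_of_lt (lt_of_lt_of_le h (Nat.pow_le_pow_right (by norm_num) hj))]

theorem pvN2 (m C k : Nat) : m &&& ((2^C - 1) <<< k) = ((m >>> k) % 2^C) <<< k := by
  apply Nat.eq_of_testBit_eq
  intro j
  rw [Nat.testBit_and, Nat.testBit_shiftLeft, Nat.testBit_shiftLeft, Nat.testBit_two_pow_sub_one,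
      Nat.testBit_mod_two_pow, Nat.testBit_shiftRight]
  rcases lt_or_ge j k with hj | hj
  · simp [Nat.not_le.mpr hj]
  · have hkj : k + (j - k) = j := by omega
    simp [hj, hkj]
    rcases lt_or_ge (j - k) C with h2 | h2
    · simp [h2]
    · simp [Nat.not_lt.mpr h2]

theorem pvI1 (a b : Int) (k : Nat) (ha : 0 ≤ a) (hb : 0 ≤ b) (hbk : b < 2^k) :
    PySem.Int.bor (a <<< k) b = a * 2^k + b := by
  obtain ⟨m, rfl⟩ := Int.eq_ofNat_of_zero_le ha
  obtain ⟨n, rfl⟩ := Int.eq_ofNat_of_zero_le hb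
  have hn : n < 2^k := by exact_mod_cast hbk
  rw [pvCastShiftL, PySem.Int.bor_natCast, pvN1 m n k hn]
  push_cast; ring

theorem pvModDiv2 (x : Int) (C : Nat) : (x % 2^(C+1)) / 2 = (x / 2) % 2^C := by
  have hdd : x / 2 / 2^C = x / 2^(C+1) := by
    rw [Int.ediv_ediv_of_nonneg (by norm_num : (0:Int) ≤ 2)]
    norm_num [pow_succ, mul_comm]
  rw [Int.emod_def, Int.emod_def, hdd]
  have h : x - 2^(C+1) * (x / 2^(C+1)) = x + (-(2^C * (x / 2^(C+1)))) * 2 := by ring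
  rw [h, Int.add_mul_ediv_right _ _ (by norm_num : (2:Int) ≠ 0)]
  ring

theorem pvNegMod (x : Nat) (M : Int) (hM : 0 < M) : (-(x:Int) - 1) % M = M - 1 - (x:Int) % M := by
  have hr0 : 0 ≤ (x:Int) % M := Int.emod_nonneg _ (by omega)
  have hr1 : (x:Int) % M < M := Int.emod_lt_of_pos _ hM
  have hd : M ∣ ((-(x:Int) - 1) - (M - 1 - (x:Int) % M)) := by
    have h : ((-(x:Int) - 1) - (M - 1 - (x:Int) % M)) = M * (-((x:Int)/M) - 1) := by
      rw [Int.emod_def]; ring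
    rw [h]
    exact Dvd.intro _ rfl
  have h1 : (-(x:Int) - 1) % M = (M - 1 - (x:Int) % M) % M :=
    Int.emod_eq_emod_iff_emod_sub_eq_zero.mpr (Int.emod_eq_zero_of_dvd hd)
  rw [h1, Int.emod_eq_of_lt (by omega) (by omega)]

theorem pvEXT (v : Int) (C k : Nat) :
    (PySem.Int.band v (((2:Int)^C - 1) <<< k)) >>> k = PySem.Int.mod (v >>> k) ((2:Int)^C) := by
  have hcast : ((2:Int)^C - 1) = (((2^C - 1 : Nat)) : Int) := by
    have h1 : (1:Nat) ≤ 2^C := Nat.one_le_two_pow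
    push_cast [h1]; ring
  have hpC : (0:Int) < 2^C := by positivity
  have hpow : ((2:Int)^C) = ((2^C : Nat) : Int) := by push_cast; ring
  have hmask : ((2:Int)^C - 1) <<< k = (((2^C - 1) <<< k : Nat) : Int) := by
    rw [hcast, pvCastShiftL]
  rcases le_or_gt 0 v with hv | hv
  · obtain ⟨m, rfl⟩ := Int.eq_ofNat_of_zero_le hv
    rw [hmask, PySem.Int.band_natCast, pvN2, pvCastShiftR, Nat.shiftLeft_shiftRight,
        pvCastShiftR, PySem.Int.mod_eq_emod_of_pos hpC, hpow]
    push_cast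
    ring
  · obtain ⟨w, hw⟩ := Int.eq_negSucc_of_lt_zero hv
    have hvw : v = -(w:Int) - 1 := by rw [hw]; simp [Int.negSucc_eq]; ring
    have hband : PySem.Int.band v (((2:Int)^C - 1) <<< k)
        = (((((2^C - 1) <<< k) - (((2^C - 1) <<< k) &&& ((-v - 1).toNat)) : Nat)) : Int) := by
      rw [PySem.Int.band]
      rw [if_neg (by omega), if_pos (by rw [hmask]; exact Int.natCast_nonneg _), hmask]
      simp only [Int.toNat_natCast]
    have hnv : (-v - 1).toNat = w := by omega
    have hland : ((2^C - 1) <<< k) &&& w = ((w >>> k) % 2^C) <<< k := by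
      rw [Nat.land_comm, pvN2]
    have hsub : ((2^C - 1) <<< k) - (((w >>> k) % 2^C) <<< k)
        = ((2^C - 1) - (w >>> k) % 2^C) <<< k := by
      simp [Nat.shiftLeft_eq, Nat.sub_mul]
    have hmlt : (w >>> k) % 2^C < 2^C := Nat.mod_lt _ (Nat.two_pow_pos C)
    rw [hband, hnv, hland, hsub, pvCastShiftR, Nat.shiftLeft_shiftRight]
    have hrhs : v >>> k = -((w >>> k : Nat) : Int) - 1 := by
      rw [hw]
      have h : Int.negSucc w >>> k = Int.negSucc (w >>> k) := rfl
      rw [h, Int.negSucc_eq]; ring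
    rw [hrhs, PySem.Int.mod_eq_emod_of_pos hpC, pvNegMod _ _ hpC, hpow, ← Int.natCast_mod]
    omega

theorem pvRow_nonneg : ∀ (C : Nat) (a v : Int), 0 ≤ a → 0 ≤ pvRow a v C := by
  intro C
  induction C with
  | zero => intro a v ha; exact ha
  | succ C ih =>
      intro a v ha
      exact ih _ _ (by have := PySem.Int.mod_nonneg v (by norm_num : (0:Int) < 2); omega)

theorem pvRow_decomp : ∀ (C : Nat) (a v : Int), pvRow a v C = a * 2^C + pvRow 0 v C := by
  intro C
  induction C with
  | zero => intro a v; simp [pvRow]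
  | succ C ih =>
      intro a v
      show pvRow (a * 2 + PySem.Int.mod v 2) (v >>> (1:Nat)) C = a * 2^(C+1) + pvRow (0 * 2 + PySem.Int.mod v 2) (v >>> (1:Nat)) C
      rw [ih (a * 2 + PySem.Int.mod v 2), ih (0 * 2 + PySem.Int.mod v 2)]
      ring

theorem pvRow_lt : ∀ (C : Nat) (v : Int), pvRow 0 v C < 2^C := by
  intro C
  induction C with
  | zero => intro v; simp [pvRow]
  | succ C ih =>
      intro v
      show pvRow (0 * 2 + PySem.Int.mod v 2) (v >>> (1:Nat)) C < 2^(C+1)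
      rw [pvRow_decomp]
      have h1 := ih (v >>> (1:Nat))
      have h2 := PySem.Int.mod_lt v (by norm_num : (0:Int) < 2)
      have h3 := PySem.Int.mod_nonneg v (by norm_num : (0:Int) < 2)
      have : ((2:Int)^(C+1)) = 2^C * 2 := by ring
      nlinarith [pow_pos (by norm_num : (0:Int) < 2) C]

theorem pvRow_mod : ∀ (C : Nat) (a v : Int), pvRow a (PySem.Int.mod v (2^C)) C = pvRow a v C := by
  intro C
  induction C with
  | zero => intro a v; rfl
  | succ C ih =>
      intro a v
      show pvRow (a * 2 + PySem.Int.mod (PySem.Int.mod v (2^(C+1))) 2) ((PySem.Int.mod v (2^(C+1))) >>> (1:Nat)) C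
           = pvRow (a * 2 + PySem.Int.mod v 2) (v >>> (1:Nat)) C
      have hp : (0:Int) < 2^(C+1) := by positivity
      have h1 : PySem.Int.mod (PySem.Int.mod v (2^(C+1))) 2 = PySem.Int.mod v 2 := by
        rw [PySem.Int.mod_eq_emod_of_pos hp, PySem.Int.mod_eq_emod_of_pos (by norm_num : (0:Int) < 2),
            PySem.Int.mod_eq_emod_of_pos (by norm_num : (0:Int) < 2)]
        exact Int.emod_emod_of_dvd v (Dvd.intro (2^C) (by ring))
      have h2 : (PySem.Int.mod v (2^(C+1))) >>> (1:Nat) = PySem.Int.mod (v >>> (1:Nat)) (2^C) := by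
        rw [PySem.Int.mod_eq_emod_of_pos hp, PySem.Int.mod_eq_emod_of_pos (by positivity : (0:Int) < 2^C),
            Int.shiftRight_eq_div_pow, Int.shiftRight_eq_div_pow]
        norm_num
        exact pvModDiv2 v C
      rw [h1, h2, ih]

theorem pvBit_nonneg (v : Int) (k : Nat) : 0 ≤ pvBit v k :=
  PySem.Int.mod_nonneg _ (by norm_num : (0:Int) < 2)

theorem pvBit_lt (v : Int) (k : Nat) : pvBit v k < 2 :=
  PySem.Int.mod_lt _ (by norm_num : (0:Int) < 2)

theorem pvBit_shift (v : Int) (a b : Nat) : pvBit (v >>> a) b = pvBit v (a + b) := by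
  unfold pvBit; rw [pvShiftRR]

theorem pvRow_eq_fold : ∀ (C : Nat) (a v : Int),
    (List.range C).foldl (fun x j => x * 2 + pvBit v j) a = pvRow a v C := by
  intro C
  induction C with
  | zero => intro a v; rfl
  | succ C ih =>
      intro a v
      rw [List.range_succ_eq_map, List.foldl_cons, List.foldl_map]
      show (List.range C).foldl (fun x j => x * 2 + pvBit v (j+1)) (a * 2 + pvBit v 0) = pvRow a v (C+1)
      have hb0 : pvBit v 0 = PySem.Int.mod v 2 := by unfold pvBit; rw [Int.shiftRight_zero]
      have hbs : ∀ x j, x * 2 + pvBit v (j+1) = x * 2 + pvBit (v >>> (1:Nat)) j := by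
        intro x j; rw [pvBit_shift, Nat.add_comm]
      rw [funext fun x => funext fun j => hbs x j] at *
      rw [ih, hb0]
      rfl

theorem pvFoldBorShift (C : Nat) {α : Type} (g : α → Int)
    (hg : ∀ x, 0 ≤ g x ∧ g x < 2^C) :
    ∀ (L : List α) (s : Int), 0 ≤ s →
      L.foldl (fun a x => PySem.Int.bor (a <<< C) (g x)) s = L.foldl (fun a x => a * 2^C + g x) s := by
  intro L
  induction L with
  | nil => intro s _; rfl
  | cons x L ih =>
      intro s hs
      rw [List.foldl_cons, List.foldl_cons, pvI1 s (g x) C hs (hg x).1 (hg x).2]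
      exact ih _ (by nlinarith [(hg x).1, pow_pos (by norm_num : (0:Int) < 2) C])

theorem pvRevFold : ∀ (L : List Int) (a num : Int), 0 ≤ a →
    ((L.foldl (fun (st : Int × Int) _ =>
        (PySem.Int.bor (st.1 <<< (1:Nat)) (PySem.Int.band st.2 1), st.2 >>> (1:Nat))) (a, num))).1
      = pvRow a num L.length := by
  intro L
  induction L with
  | nil => intro a num _; rfl
  | cons x L ih =>
      intro a num ha
      rw [List.foldl_cons]
      show ((L.foldl _ (PySem.Int.bor (a <<< (1:Nat)) (PySem.Int.band num 1), num >>> (1:Nat)))).1 = _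
      have hb : PySem.Int.band num 1 = PySem.Int.mod num 2 := PySem.Int.band_one num
      have h2 := PySem.Int.mod_nonneg num (by norm_num : (0:Int) < 2)
      have h3 := PySem.Int.mod_lt num (by norm_num : (0:Int) < 2)
      rw [hb, pvI1 a _ 1 ha h2 (by rw [pow_one]; exact h3)]
      have := ih (a * 2^1 + PySem.Int.mod num 2) (num >>> (1:Nat)) (by nlinarith)
      simpa [pvRow] using this

theorem pvRevBits (num : Int) (C : Nat) : reverse_bits num (C:Int) = pvRow 0 num C := by
  unfold reverse_bits
  rw [pvRevFold _ 0 num le_rfl, PySem.List.length_pyRange_one]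
  simp

theorem pvCleanA : ∀ (R C : Nat) (v : Int),
    (List.range R).foldl (fun s k => s * 2^C + pvRow 0 (v >>> ((R-1-k)*C)) C) 0 = pvSpec C R v := by
  intro R
  induction R with
  | zero => intro C v; rfl
  | succ R ih =>
      intro C v
      rw [List.range_succ, List.foldl_append]
      have hcongr : (List.range R).foldl (fun s k => s * 2^C + pvRow 0 (v >>> ((R+1-1-k)*C)) C) 0
          = (List.range R).foldl (fun s k => s * 2^C + pvRow 0 ((v >>> C) >>> ((R-1-k)*C)) C) 0 := by
        apply PySem.List.foldl_congr_mem
        intro acc k hk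
        have hk' : k < R := List.mem_range.mp hk
        have h1 : (R+1-1-k)*C = C + (R-1-k)*C := by
          have : R+1-1-k = (R-1-k)+1 := by omega
          rw [this, Nat.add_mul, one_mul]; omega
        rw [h1, pvShiftRR]
      rw [hcongr, ih C (v >>> C)]
      show pvSpec C R (v >>> C) * 2^C + pvRow 0 (v >>> ((R+1-1-R)*C)) C = pvSpec C (R+1) v
      have h2 : (R+1-1-R)*C = 0 := by
        have h : R+1-1-R = 0 := by omega
        rw [h, Nat.zero_mul]
      rw [h2]
      show pvSpec C R (v >>> C) * 2^C + pvRow 0 (v >>> (0:Nat)) C = pvRow (pvSpec C R (v >>> C)) v C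
      rw [pvRow_decomp C (pvSpec C R (v >>> C)) v]
      norm_num

theorem pvPlaneA : ∀ (R C : Nat) (v : Int),
    (PySem.List.pyRange 0 (R:Int) 1).foldl
      (fun s i => PySem.Int.bor (s <<< ((C:Int)).toNat)
        (reverse_bits
          ((PySem.Int.band v (((2:Int) ^ ((C:Int)).toNat - 1) <<< ((((R:Int)) - 1 - i) * (C:Int)).toNat)) >>>
            ((((R:Int)) - 1 - i) * (C:Int)).toNat)
          (C:Int))) 0 = pvSpec C R v := by
  intro R C v
  have step1 : (PySem.List.pyRange 0 (R:Int) 1).foldl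
      (fun s i => PySem.Int.bor (s <<< ((C:Int)).toNat)
        (reverse_bits
          ((PySem.Int.band v (((2:Int) ^ ((C:Int)).toNat - 1) <<< ((((R:Int)) - 1 - i) * (C:Int)).toNat)) >>>
            ((((R:Int)) - 1 - i) * (C:Int)).toNat)
          (C:Int))) 0
      = (List.range R).foldl (fun s k => PySem.Int.bor (s <<< C) (pvRow 0 (v >>> ((R-1-k)*C)) C)) 0 := by
    rw [PySem.List.pyRange_one, List.foldl_map]
    simp only [Int.sub_zero, Int.toNat_natCast]
    apply PySem.List.foldl_congr_mem
    intro acc k hk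
    have hk' : k < R := List.mem_range.mp hk
    have hsh : (((R:Int) - 1 - (0 + (k:Int))) * (C:Int)).toNat = (R-1-k)*C := by
      have h1 : ((R:Int) - 1 - (0 + (k:Int))) = ((R-1-k : Nat) : Int) := by omega
      rw [h1, ← Nat.cast_mul, Int.toNat_natCast]
    rw [hsh, pvEXT v C ((R-1-k)*C), pvRevBits, pvRow_mod]
  rw [step1,
      pvFoldBorShift C (fun k => pvRow 0 (v >>> ((R-1-k)*C)) C)
        (fun k => ⟨pvRow_nonneg C 0 _ le_rfl, pvRow_lt C _⟩) (List.range R) 0 le_rfl,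
      pvCleanA]

theorem pvSrc_top (C q : Nat) (hC : 0 < C) (hq : C ≤ q) : pvSrc C q = C + pvSrc C (q - C) := by
  obtain ⟨x, rfl⟩ : ∃ x, q = x + C := ⟨q - C, by omega⟩
  unfold pvSrc
  rw [Nat.add_div_right _ hC, Nat.add_mod_right, Nat.add_mul, one_mul, Nat.add_sub_cancel]
  omega

theorem pvSrc_low (C q : Nat) (hq : q < C) : pvSrc C q = C - 1 - q := by
  unfold pvSrc
  rw [Nat.div_eq_of_lt hq, Nat.mod_eq_of_lt hq]
  omega

theorem pvMainB : ∀ (R C : Nat) (v : Int), 0 < C →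
    (List.range (R*C)).foldl (fun a k => a * 2 + pvBit v (pvSrc C (R*C-1-k))) 0 = pvSpec C R v := by
  intro R
  induction R with
  | zero => intro C v _; rw [Nat.zero_mul]; rfl
  | succ R ih =>
      intro C v hC
      have hn : (R+1)*C = R*C + C := by ring
      rw [hn, List.range_add, List.foldl_append]
      have hcongr : (List.range (R*C)).foldl (fun a k => a * 2 + pvBit v (pvSrc C (R*C + C-1-k))) 0
          = (List.range (R*C)).foldl (fun a k => a * 2 + pvBit (v >>> C) (pvSrc C (R*C-1-k))) 0 := by
        apply PySem.List.foldl_congr_mem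
        intro acc k hk
        have hk' : k < R*C := List.mem_range.mp hk
        have h1 : R*C + C-1-k = (R*C-1-k) + C := by omega
        rw [h1, Nat.add_comm (R*C-1-k) C, pvSrc_top C _ hC (by omega), Nat.add_sub_cancel_left,
            pvBit_shift]
      rw [hcongr, ih C (v >>> C) hC, List.foldl_map]
      have hcongr2 : (List.range C).foldl (fun a j => a * 2 + pvBit v (pvSrc C (R*C + C-1-(R*C + j)))) (pvSpec C R (v >>> C))
          = (List.range C).foldl (fun a j => a * 2 + pvBit v j) (pvSpec C R (v >>> C)) := by
        apply PySem.List.foldl_congr_mem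
        intro acc j hj
        have hj' : j < C := List.mem_range.mp hj
        have h2 : R*C + C-1-(R*C + j) = C-1-j := by omega
        rw [h2, pvSrc_low C _ (by omega)]
        have h3 : C-1-(C-1-j) = j := by omega
        rw [h3]
      rw [hcongr2, pvRow_eq_fold]
      rfl

theorem pvPlaneB : ∀ (R C : Nat) (v : Int), 0 < C →
    pvMirror v (R:Int) (C:Int) = pvSpec C R v := by
  intro R C v hC
  unfold pvMirror
  have hlist : ((R:Int) * (C:Int) - 1 - (-1) : Int) = ((R*C : Nat) : Int) := by push_cast; ring
  rw [PySem.List.pyRange_neg_one]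
  simp only [hlist, Int.toNat_natCast, List.foldl_map]
  refine (PySem.List.foldl_congr_mem (List.range (R*C)) _
      (fun (a : Int) (k : Nat) => PySem.Int.bor (a <<< (1:Nat)) (pvBit v (pvSrc C (R*C-1-k)))) 0 ?_).trans ?_
  · intro acc k hk
    have hk' : k < R*C := List.mem_range.mp hk
    dsimp only
    have hq : ((R:Int) * (C:Int) - 1 - (k:Int)) = ((R*C-1-k : Nat) : Int) := by
      have h0 : ((R:Int) * (C:Int)) = ((R*C : Nat) : Int) := by push_cast; ring
      rw [h0]; omega
    rw [hq]
    have hmlt : (R*C-1-k) % C < C := Nat.mod_lt _ hC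
    have hsrc : ((PySem.Int.floordiv ((R*C-1-k : Nat) : Int) (C:Int)) * (C:Int) +
        ((C:Int) - 1 - PySem.Int.mod ((R*C-1-k : Nat) : Int) (C:Int))).toNat = pvSrc C (R*C-1-k) := by
      rw [PySem.Int.floordiv_natCast, PySem.Int.mod_natCast]
      have h2 : ((C:Int) - 1 - (((R*C-1-k) % C : Nat) : Int)) = ((C - 1 - (R*C-1-k) % C : Nat) : Int) := by
        omega
      rw [h2, ← Nat.cast_mul, ← Nat.cast_add, Int.toNat_natCast]
      rfl
    rw [hsrc, PySem.Int.band_one]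
    rfl
  · rw [pvFoldBorShift 1 (fun k => pvBit v (pvSrc C (R*C-1-k)))
        (fun k => ⟨pvBit_nonneg v _, by rw [pow_one]; exact pvBit_lt v _⟩) (List.range (R*C)) 0 le_rfl]
    have hpow1 : ∀ (a : Int), a * 2^1 = a * 2 := by intro a; rw [pow_one]
    simp only [hpow1]
    exact pvMainB R C v hC

-- ===== VERDICT (by name: the statement is the Claim_ definition above) =====
theorem pvFoldlId : ∀ (L : List Int) (x : Int × Int), L.foldl (fun s _ => s) x = x := by
  intro L
  induction L with
  | nil => intro x; rfl
  | cons y L ih => intro x; exact ih x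

theorem get_encoded_symmetrical_board_spec : Claim_equal_get_encoded_symmetrical_board := by
  unfold Claim_equal_get_encoded_symmetrical_board
  intro b R C _ hpre
  unfold Spec_get_encoded_symmetrical_board
  unfold Pre_get_encoded_symmetrical_board at hpre
  unfold get_encoded_symmetrical_board get_encoded_symmetrical_board_alt
  dsimp only
  by_cases hR : R ≤ 0
  · rw [if_pos (Or.inl hR), PySem.List.pyRange_one_eq_nil hR]
    rfl
  · push_neg at hR
    have hC0 : 0 ≤ C := by rcases hpre with h | h; omega; exact h
    by_cases hC : C ≤ 0
    · have hCeq : C = 0 := le_antisymm hC hC0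
      subst hCeq
      rw [if_pos (Or.inr le_rfl)]
      have hrev : reverse_bits 0 (0:Int) = 0 := rfl
      have hbody : ∀ (st : Int × Int), ∀ i ∈ PySem.List.pyRange 0 R 1,
          (PySem.Int.bor (st.1 <<< (0:Int).toNat)
            (reverse_bits ((PySem.Int.band b.1 (((2:Int) ^ (0:Int).toNat - 1) <<< ((R - 1 - i) * 0).toNat)) >>> ((R - 1 - i) * 0).toNat) 0),
           PySem.Int.bor (st.2 <<< (0:Int).toNat)
            (reverse_bits ((PySem.Int.band b.2 (((2:Int) ^ (0:Int).toNat - 1) <<< ((R - 1 - i) * 0).toNat)) >>> ((R - 1 - i) * 0).toNat) 0))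
          = st := by
        intro st i _
        have hz : ((2:Int) ^ (0:Int).toNat - 1) = 0 := by norm_num
        rw [hz]
        simp only [Int.zero_shiftLeft, PySem.Int.band_zero, Int.zero_shiftRight, hrev,
          PySem.Int.bor_zero, Int.toNat_zero, Int.shiftLeft_zero]
      rw [PySem.List.foldl_congr_mem _ _ (fun (st : Int × Int) (_ : Int) => st) _ hbody, pvFoldlId]
    · push_neg at hC
      rw [if_neg (by omega)]
      have hRe : R = ((R.toNat : Nat) : Int) := (Int.toNat_of_nonneg (by omega)).symm
      have hCe : C = ((C.toNat : Nat) : Int) := (Int.toNat_of_nonneg (by omega)).symm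
      have hCN : 0 < C.toNat := by omega
      rw [hRe, hCe]
      have hsplit := PySem.List.foldl_prod_mk
        (fun (s : Int) (i : Int) => PySem.Int.bor (s <<< ((C.toNat : Int)).toNat)
          (reverse_bits
            ((PySem.Int.band b.1 (((2:Int) ^ ((C.toNat : Int)).toNat - 1) <<< ((((R.toNat : Int)) - 1 - i) * (C.toNat : Int)).toNat)) >>>
              ((((R.toNat : Int)) - 1 - i) * (C.toNat : Int)).toNat)
            (C.toNat : Int)))
        (fun (s : Int) (i : Int) => PySem.Int.bor (s <<< ((C.toNat : Int)).toNat)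
          (reverse_bits
            ((PySem.Int.band b.2 (((2:Int) ^ ((C.toNat : Int)).toNat - 1) <<< ((((R.toNat : Int)) - 1 - i) * (C.toNat : Int)).toNat)) >>>
              ((((R.toNat : Int)) - 1 - i) * (C.toNat : Int)).toNat)
            (C.toNat : Int)))
        (PySem.List.pyRange 0 (R.toNat : Int) 1) 0 0
      rw [hsplit,
          pvPlaneA R.toNat C.toNat b.1, pvPlaneA R.toNat C.toNat b.2,
          pvPlaneB R.toNat C.toNat b.1 hCN, pvPlaneB R.toNat C.toNat b.2 hCN]
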